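-- pv_equiv track=rewrite | github.com/zvorchik/elegoo-homeassistant2022 | custom_components/elegoo_printer/config_flow.py | _normalize_gcode_proxy_base_url
-- ===== SOURCE A (Python) =====
-- def _normalize_gcode_proxy_base_url(raw: str) -> str | None:
--     """
--     Build a canonical http(s) base URL for the GCode capture proxy from user input.
--
--     Strips repeated ``http://`` / ``https://`` / ``//`` prefixes so values like
--     ``http://http://192.168.1.1`` are not stored. Defaults to ``http`` when no
--     scheme is given. Returns ``None`` if the value is empty or malformed.
--
--     Arguments:
--         raw: User-entered host, host:port, or URL.
--
--     Returns:
--         Canonical ``http://...`` or ``https://...`` base URL, or ``None``.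
--
--     """
--     cleaned = raw.strip()
--     if not cleaned:
--         return None
--
--     scheme = "http"
--     while cleaned:
--         lower = cleaned.lower()
--         if lower.startswith("https://"):
--             scheme = "https"
--             cleaned = cleaned[8:].strip()
--             continue
--         if lower.startswith("http://"):
--             cleaned = cleaned[7:].strip()
--             continue
--         if lower.startswith("//"):
--             cleaned = cleaned[2:].strip()
--             continue
--         break
--
--     cleaned = cleaned.rstrip("/")
--     if not cleaned:
--         return None
--     if "://" in cleaned:
--         return None
--     return f"{scheme}://{cleaned}"
-- ===== SOURCE B (Python) =====
-- def _normalize_gcode_proxy_base_url(raw: str) -> str | None: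
--     """Single-pass index scan instead of repeated slicing: find the end of the
--     whole leading prefix block on one lowercased copy, pick https iff an 's'
--     occurs in that block (only the https:// token can contribute one)."""
--     cleaned = raw.strip()
--     if not cleaned:
--         return None
--     low = cleaned.lower()
--     n = _prefix_block_end(cleaned, low)
--     scheme = "https" if "s" in low[:n] else "http"
--     rest = cleaned[n:].rstrip("/")
--     if not rest or "://" in rest:
--         return None
--     return "%s://%s" % (scheme, rest)
--
--
-- def _prefix_block_end(s: str, low: str) -> int:
--     """Index just past the leading block of http:// / https:// / // tokens
--     separated by whitespace."""
--     i = 0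
--     while True:
--         if low.startswith("https://", i):
--             i += 8
--         elif low.startswith("http://", i):
--             i += 7
--         elif low.startswith("//", i):
--             i += 2
--         else:
--             return i
--         while i < len(s) and s[i].isspace():
--             i += 1
-- ===== Notes on version B (the rewrite author's own statement) =====
-- stated objective: alternative
-- what changed: Replaces A's while-loop that repeatedly lowercases, slices and re-strips the remaining string with a single index scan over one lowercased copy that finds the end of the whole leading prefix block, deciding the scheme by whether the letter ess occurs in that block (only an https:// token can contribute one).
import Mathlib
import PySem

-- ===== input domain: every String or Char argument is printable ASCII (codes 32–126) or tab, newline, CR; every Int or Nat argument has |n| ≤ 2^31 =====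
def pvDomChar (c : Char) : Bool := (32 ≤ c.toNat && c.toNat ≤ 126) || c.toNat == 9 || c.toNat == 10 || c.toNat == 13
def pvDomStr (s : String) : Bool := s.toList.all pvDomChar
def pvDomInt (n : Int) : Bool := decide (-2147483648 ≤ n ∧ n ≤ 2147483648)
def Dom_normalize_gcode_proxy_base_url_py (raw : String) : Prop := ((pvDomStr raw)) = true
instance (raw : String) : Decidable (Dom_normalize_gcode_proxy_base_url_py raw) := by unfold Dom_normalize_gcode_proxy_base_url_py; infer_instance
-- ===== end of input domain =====

-- B replaces A's slice-and-restrip loop by a single index scan over one lowercased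
-- copy (scheme decided by an 's' occurring in the prefix block); alternative, not
-- measured faster.

-- shared literal helper for Python's s.rstrip("/") (both sources call it; exact:
-- drops the trailing run of '/' characters)
def pvRstripSlash (s : List Char) : List Char :=
  (List.dropWhile (fun c => c == '/') s.reverse).reverse

-- termination support for pvALoop (cited in decreasing_by)
theorem pv_strip_length_le (s : List Char) :
    (PySem.Chars.strip s).length ≤ s.length := by
  simp only [PySem.Chars.strip, PySem.Chars.lstrip, PySem.Chars.rstrip, List.length_reverse]
  calc (List.dropWhile PySem.Chars.isspace (List.dropWhile PySem.Chars.isspace s).reverse).length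
      ≤ (List.dropWhile PySem.Chars.isspace s).reverse.length := List.length_dropWhile_le _ _
    _ ≤ s.length := by
        rw [List.length_reverse]; exact List.length_dropWhile_le _ _

theorem pv_prefix_lower_length {s p : List Char}
    (h : PySem.Chars.startswith (PySem.Chars.lower s) p = true) : p.length ≤ s.length := by
  have := List.IsPrefix.length_le (List.isPrefixOf_iff_prefix.mp h)
  simpa [PySem.Chars.lower] using this

-- ===== PORT A =====
-- literal port of the while-loop: re-lowercases, slices ([k:] = List.drop k) and
-- strips the remaining string at every step, threading the scheme accumulator
def pvALoop (scheme : String) (cleaned : List Char) : String × List Char :=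
  if hne : cleaned = [] then (scheme, cleaned)
  else
    let lower := PySem.Chars.lower cleaned
    if h8 : PySem.Chars.startswith lower "https://".toList then
      pvALoop "https" (PySem.Chars.strip (cleaned.drop 8))
    else if h7 : PySem.Chars.startswith lower "http://".toList then
      pvALoop scheme (PySem.Chars.strip (cleaned.drop 7))
    else if h2 : PySem.Chars.startswith lower "//".toList then
      pvALoop scheme (PySem.Chars.strip (cleaned.drop 2))
    else (scheme, cleaned)
termination_by cleaned.length
decreasing_by
  · have h1 := pv_strip_length_le (cleaned.drop 8)
    have hl : ("https://".toList).length = 8 := rfl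
    have h2 := hl ▸ pv_prefix_lower_length h8
    simp only [List.length_drop] at h1 ⊢; omega
  · have h1 := pv_strip_length_le (cleaned.drop 7)
    have hl : ("http://".toList).length = 7 := rfl
    have h2 := hl ▸ pv_prefix_lower_length h7
    simp only [List.length_drop] at h1 ⊢; omega
  · have h1 := pv_strip_length_le (cleaned.drop 2)
    have hl : ("//".toList).length = 2 := rfl
    have h2' := hl ▸ pv_prefix_lower_length h2
    simp only [List.length_drop] at h1 ⊢; omega

def normalize_gcode_proxy_base_url_py (raw : String) : Option String :=
  let cleaned := PySem.Chars.strip raw.toList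
  if cleaned = [] then none
  else
    let r := pvALoop "http" cleaned
    let cleaned2 := pvRstripSlash r.2
    if cleaned2 = [] then none
    else if PySem.Chars.isIn "://".toList cleaned2 then none
    else String.ofList (r.1.toList ++ "://".toList ++ cleaned2)

-- ===== PORT B =====
-- the inner `while i < len(s) and s[i].isspace(): i += 1`
def pvSkipWs (s : List Char) (i : Nat) : Nat :=
  if h : i < s.length then
    if PySem.Chars.isspace s[i] then pvSkipWs s (i + 1) else i
  else i
termination_by s.length - i

-- termination support for pvBlockEnd (cited in decreasing_by)
theorem pv_skipWs_ge (s : List Char) (i : Nat) : i ≤ pvSkipWs s i := by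
  fun_induction pvSkipWs s i <;> omega

-- `low.startswith(pat, i)` ported as pat being a prefix of low[i:] (exact for i ≥ 0)
def pvBlockEnd (s low : List Char) (i : Nat) : Nat :=
  if PySem.Chars.startswith (low.drop i) "https://".toList then
    pvBlockEnd s low (pvSkipWs s (i + 8))
  else if PySem.Chars.startswith (low.drop i) "http://".toList then
    pvBlockEnd s low (pvSkipWs s (i + 7))
  else if PySem.Chars.startswith (low.drop i) "//".toList then
    pvBlockEnd s low (pvSkipWs s (i + 2))
  else i
termination_by low.length - i
decreasing_by
  · have hg := pv_skipWs_ge s (i + 8)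
    have hl : ("https://".toList).length = 8 := rfl
    have h2 := List.IsPrefix.length_le (List.isPrefixOf_iff_prefix.mp (by assumption : PySem.Chars.startswith (low.drop i) "https://".toList = true))
    simp only [hl, List.length_drop] at h2
    omega
  · have hg := pv_skipWs_ge s (i + 7)
    have hl : ("http://".toList).length = 7 := rfl
    have h2 := List.IsPrefix.length_le (List.isPrefixOf_iff_prefix.mp (by assumption : PySem.Chars.startswith (low.drop i) "http://".toList = true))
    simp only [hl, List.length_drop] at h2
    omega
  · have hg := pv_skipWs_ge s (i + 2)
    have hl : ("//".toList).length = 2 := rfl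
    have h2 := List.IsPrefix.length_le (List.isPrefixOf_iff_prefix.mp (by assumption : PySem.Chars.startswith (low.drop i) "//".toList = true))
    simp only [hl, List.length_drop] at h2
    omega

def normalize_gcode_proxy_base_url_py_alt (raw : String) : Option String :=
  let cleaned := PySem.Chars.strip raw.toList
  if cleaned = [] then none
  else
    let low := PySem.Chars.lower cleaned
    let n := pvBlockEnd cleaned low 0
    -- low[:n] = List.take n, cleaned[n:] = List.drop n (exact for n ≥ 0)
    let scheme := if PySem.Chars.isIn ['s'] (low.take n) then "https" else "http"
    let rest := pvRstripSlash (cleaned.drop n)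
    if rest = [] then none
    else if PySem.Chars.isIn "://".toList rest then none
    else String.ofList (scheme.toList ++ "://".toList ++ rest)

-- ===== PRECONDITION & SPEC =====
def Spec_normalize_gcode_proxy_base_url_py (raw : String) (out : Option String) : Prop := out = normalize_gcode_proxy_base_url_py_alt raw
instance (raw : String) (out : Option String) : Decidable (Spec_normalize_gcode_proxy_base_url_py raw out) := by unfold Spec_normalize_gcode_proxy_base_url_py; infer_instance

-- ===== CLAIM (what is proved, stated in full; the proofs are below) =====
def Claim_equal_normalize_gcode_proxy_base_url_py : Prop := ∀ (raw : String), Dom_normalize_gcode_proxy_base_url_py raw → Spec_normalize_gcode_proxy_base_url_py raw (normalize_gcode_proxy_base_url_py raw)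

-- ===== LEMMAS AND PROOFS =====

-- "no trailing whitespace": the invariant pvALoop's repeated .strip() preserves
def pvNTW (l : List Char) : Prop := ∀ c ∈ l.getLast?, PySem.Chars.isspace c = false

theorem pv_head?_dropWhile {p : Char → Bool} {l : List Char} {c : Char}
    (h : c ∈ (List.dropWhile p l).head?) : p c = false := by
  induction l with
  | nil => simp [List.dropWhile] at h
  | cons a t ih =>
    by_cases hp : p a
    · rw [List.dropWhile_cons_of_pos hp] at h; exact ih h
    · rw [List.dropWhile_cons_of_neg hp] at h
      simp at h
      subst h
      simpa using hp

theorem pv_ntw_rstrip (l : List Char) : pvNTW (PySem.Chars.rstrip l) := by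
  intro c hc
  rw [PySem.Chars.rstrip, List.getLast?_reverse] at hc
  exact pv_head?_dropWhile hc

theorem pv_ntw_drop {l : List Char} (h : pvNTW l) (k : Nat) : pvNTW (l.drop k) := by
  intro c hc
  rw [List.getLast?_drop] at hc
  by_cases hk : l.length ≤ k
  · simp [hk] at hc
  · rw [if_neg hk] at hc; exact h c hc

theorem pv_rstrip_of_ntw {l : List Char} (h : pvNTW l) : PySem.Chars.rstrip l = l := by
  rw [PySem.Chars.rstrip]
  have : List.dropWhile PySem.Chars.isspace l.reverse = l.reverse := by
    rw [List.dropWhile_eq_self_iff]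
    intro hl
    have h0 : l.reverse[0] = l[l.length - 1 - 0]'(by simp at hl ⊢; omega) := List.getElem_reverse _
    rw [h0]
    have hlast : l.getLast? = some (l[l.length - 1 - 0]'(by simp at hl ⊢; omega)) := by
      rw [List.getLast?_eq_getElem?]
      exact List.getElem?_eq_getElem _
    simpa using h _ hlast
  rw [this, List.reverse_reverse]

theorem pv_strip_eq_of_ntw {cs : List Char} (h : pvNTW cs) (j : Nat) :
    PySem.Chars.strip (cs.drop j) = cs.drop (pvSkipWs cs j) := by
  have hd : cs.drop (pvSkipWs cs j) = List.dropWhile PySem.Chars.isspace (cs.drop j) := by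
    fun_induction pvSkipWs cs j with
    | case1 i hlt hsp ih =>
      rw [ih, List.drop_eq_getElem_cons hlt, List.dropWhile_cons_of_pos hsp]
    | case2 i hlt hsp =>
      rw [List.drop_eq_getElem_cons hlt, List.dropWhile_cons_of_neg hsp,
        ← List.drop_eq_getElem_cons hlt]
    | case3 i hge =>
      have : cs.drop i = [] := List.drop_eq_nil_of_le (by omega)
      simp [this]
  rw [PySem.Chars.strip, PySem.Chars.lstrip, ← hd]
  exact pv_rstrip_of_ntw (pv_ntw_drop h _)

-- the characters the inner skip loop passes over are exactly takeWhile isspace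
theorem pv_take_skipWs (cs : List Char) (j : Nat) :
    (cs.drop j).take (pvSkipWs cs j - j) = List.takeWhile PySem.Chars.isspace (cs.drop j) := by
  fun_induction pvSkipWs cs j with
  | case1 i hlt hsp ih =>
    have hge := pv_skipWs_ge cs (i + 1)
    rw [List.drop_eq_getElem_cons hlt, List.takeWhile_cons_of_pos hsp]
    have hsub : pvSkipWs cs (i + 1) - i = (pvSkipWs cs (i + 1) - (i + 1)) + 1 := by omega
    rw [hsub, List.take_succ_cons, ih]
  | case2 i hlt hsp =>
    rw [List.drop_eq_getElem_cons hlt, List.takeWhile_cons_of_neg hsp]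
    simp
  | case3 i hge =>
    have : cs.drop i = [] := List.drop_eq_nil_of_le (by omega)
    simp [this]

theorem pv_blockEnd_ge (s low : List Char) (i : Nat) : i ≤ pvBlockEnd s low i := by
  fun_induction pvBlockEnd s low i with
  | case1 i h ih => have := pv_skipWs_ge s (i + 8); omega
  | case2 i h1 h ih => have := pv_skipWs_ge s (i + 7); omega
  | case3 i h1 h2 h ih => have := pv_skipWs_ge s (i + 2); omega
  | case4 => omega

theorem pv_isspace_lower_ne_s {c : Char} (h : PySem.Chars.isspace c = true) :
    PySem.Chars.lowerChar c ≠ 's' := by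
  have hn : c.toNat = 32 ∨ (9 ≤ c.toNat ∧ c.toNat ≤ 13) ∨ (28 ≤ c.toNat ∧ c.toNat ≤ 31) ∨ c.toNat = 133 ∨ c.toNat = 160 ∨ c.toNat = 5760 ∨ (8192 ≤ c.toNat ∧ c.toNat ≤ 8202) ∨ c.toNat = 8232 ∨ c.toNat = 8233 ∨ c.toNat = 8239 ∨ c.toNat = 8287 ∨ c.toNat = 12288 := by
    simp [PySem.Chars.isspace] at h; omega
  have hup : PySem.Chars.isupper c = false := by
    simp only [PySem.Chars.isupper, Bool.and_eq_false_iff, decide_eq_false_iff_not, Char.le_def]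
    rcases Nat.lt_or_ge c.toNat 65 with hlt | hge
    · left; intro hle
      have h2 : (65 : Nat) ≤ c.toNat := UInt32.le_iff_toNat_le.mp hle
      omega
    · right; intro hle
      have h2 : c.toNat ≤ 90 := UInt32.le_iff_toNat_le.mp hle
      omega
  rw [PySem.Chars.lowerChar, if_neg (by simp [hup])]
  intro hc
  subst hc
  exact absurd hn (by decide)

theorem pv_isIn_s (l : List Char) : PySem.Chars.isIn ['s'] l = true ↔ 's' ∈ l := by
  rw [PySem.Chars.isIn_iff_infix, List.singleton_infix_iff]

theorem pv_lower_drop (cs : List Char) (k : Nat) :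
    PySem.Chars.lower (cs.drop k) = (PySem.Chars.lower cs).drop k := by
  simp [PySem.Chars.lower, List.map_drop]

theorem pv_lower_length (cs : List Char) : (PySem.Chars.lower cs).length = cs.length := by
  simp [PySem.Chars.lower]

theorem pv_prefix_decomp {pat l : List Char} (h : PySem.Chars.startswith l pat = true) :
    l = pat ++ l.drop pat.length := by
  obtain ⟨t, rfl⟩ := List.isPrefixOf_iff_prefix.mp h
  rw [List.drop_left]


theorem pvALoop_eq (sc : String) (t : List Char) (h : t ≠ []) :
    pvALoop sc t =
      if PySem.Chars.startswith (PySem.Chars.lower t) "https://".toList then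
        pvALoop "https" (PySem.Chars.strip (t.drop 8))
      else if PySem.Chars.startswith (PySem.Chars.lower t) "http://".toList then
        pvALoop sc (PySem.Chars.strip (t.drop 7))
      else if PySem.Chars.startswith (PySem.Chars.lower t) "//".toList then
        pvALoop sc (PySem.Chars.strip (t.drop 2))
      else (sc, t) := by
  rw [pvALoop, dif_neg h]; rfl

theorem pv_main_base (cs low : List Char) (hlow : low = PySem.Chars.lower cs)
    (i : Nat) (sc : String) (hile : cs.length ≤ i) :
    pvALoop sc (cs.drop i) =
      ((if 's' ∈ (low.take (pvBlockEnd cs low i)).drop i then "https" else sc),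
       cs.drop (pvBlockEnd cs low i)) := by
  have hnil : cs.drop i = [] := List.drop_eq_nil_of_le hile
  have hlnil : low.drop i = [] := by
    apply List.drop_eq_nil_of_le
    rw [hlow, pv_lower_length]; exact hile
  have hbe : pvBlockEnd cs low i = i := by
    rw [pvBlockEnd, hlnil]
    simp [PySem.Chars.startswith]
  have htake : (low.take i).drop i = [] := by
    apply List.drop_eq_nil_of_le
    exact le_trans (List.length_take_le _ _) (le_refl _)
  rw [hbe, hnil, htake, pvALoop, dif_pos rfl, if_neg (by simp)]

theorem pv_seg_iff (cs low : List Char) (hlow : low = PySem.Chars.lower cs)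
    (i : Nat) (pat : List Char) (hs : 's' ∉ pat)
    (hp : PySem.Chars.startswith (low.drop i) pat = true)
    (n : Nat) (hn : pvSkipWs cs (i + pat.length) ≤ n) :
    ('s' ∈ (low.take n).drop i) ↔ ('s' ∈ (low.take n).drop (pvSkipWs cs (i + pat.length))) := by
  have hj : i + pat.length ≤ pvSkipWs cs (i + pat.length) := pv_skipWs_ge cs (i + pat.length)
  constructor
  · intro hm
    have hsplit : (low.take n).drop i =
        ((low.take n).drop i).take (pvSkipWs cs (i + pat.length) - i) ++
          (low.take n).drop (pvSkipWs cs (i + pat.length)) := by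
      have h1 : (low.take n).drop (pvSkipWs cs (i + pat.length)) =
          ((low.take n).drop i).drop (pvSkipWs cs (i + pat.length) - i) := by
        rw [List.drop_drop, show i + (pvSkipWs cs (i + pat.length) - i) =
          pvSkipWs cs (i + pat.length) from by omega]
      rw [h1, List.take_append_drop]
    rw [hsplit] at hm
    rcases List.mem_append.mp hm with hmid | hok
    · exfalso
      rw [List.drop_take, List.take_take,
        show min (pvSkipWs cs (i + pat.length) - i) (n - i) =
          pvSkipWs cs (i + pat.length) - i from by omega,
        pv_prefix_decomp hp, List.take_append,
        List.take_of_length_le (show pat.length ≤ _ from by omega)] at hmid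
      rcases List.mem_append.mp hmid with h1 | h2
      · exact hs h1
      · have hld2 : PySem.Chars.lower (cs.drop (i + pat.length)) = low.drop (i + pat.length) := by
          rw [pv_lower_drop, ← hlow]
        rw [List.drop_drop, ← hld2, PySem.Chars.lower, ← List.map_take,
          show pvSkipWs cs (i + pat.length) - i - pat.length =
            pvSkipWs cs (i + pat.length) - (i + pat.length) from by omega,
          pv_take_skipWs] at h2
        obtain ⟨c, hc, hceq⟩ := List.mem_map.mp h2
        exact pv_isspace_lower_ne_s (List.mem_takeWhile_imp hc) hceq
    · exact hok
  · intro hm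
    have h1 : (low.take n).drop (pvSkipWs cs (i + pat.length)) =
        ((low.take n).drop i).drop (pvSkipWs cs (i + pat.length) - i) := by
      rw [List.drop_drop, show i + (pvSkipWs cs (i + pat.length) - i) =
        pvSkipWs cs (i + pat.length) from by omega]
    rw [h1] at hm
    exact List.mem_of_mem_drop hm

-- the main loop invariant: A's loop on cs[i:] lands exactly at B's block end, and
-- upgrades the scheme iff an 's' occurs in low[i:blockEnd]
theorem pv_main (cs : List Char) (hr : pvNTW cs) (low : List Char)
    (hlow : low = PySem.Chars.lower cs) :
    ∀ k i sc, cs.length - i ≤ k →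
      pvALoop sc (cs.drop i) =
        ((if 's' ∈ (low.take (pvBlockEnd cs low i)).drop i then "https" else sc),
         cs.drop (pvBlockEnd cs low i)) := by
  intro k
  induction k with
  | zero =>
    intro i sc hk
    exact pv_main_base cs low hlow i sc (by omega)
  | succ k ih =>
    intro i sc hk
    by_cases hile : cs.length ≤ i
    · exact pv_main_base cs low hlow i sc hile
    · have hne : cs.drop i ≠ [] := by
        intro hcon
        have := List.drop_eq_nil_iff.mp hcon
        omega
      have hld : PySem.Chars.lower (cs.drop i) = low.drop i := by
        rw [pv_lower_drop, ← hlow]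
      have hlen : low.length = cs.length := by rw [hlow, pv_lower_length]
      rw [pvALoop_eq _ _ hne, hld]
      by_cases h8 : PySem.Chars.startswith (low.drop i) "https://".toList
      · rw [if_pos h8]
        have hplen : i + 8 ≤ cs.length := by
          have h1 := List.IsPrefix.length_le (List.isPrefixOf_iff_prefix.mp h8)
          rw [show ("https://".toList).length = 8 from rfl, List.length_drop, hlen] at h1
          omega
        have hj8 : i + 8 ≤ pvSkipWs cs (i + 8) := pv_skipWs_ge cs (i + 8)
        have hstep : PySem.Chars.strip ((cs.drop i).drop 8) = cs.drop (pvSkipWs cs (i + 8)) := by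
          rw [List.drop_drop]
          exact pv_strip_eq_of_ntw hr (i + 8)
        rw [hstep, ih (pvSkipWs cs (i + 8)) "https" (by omega),
          show pvBlockEnd cs low i = pvBlockEnd cs low (pvSkipWs cs (i + 8)) from by
            rw [pvBlockEnd, if_pos h8]]
        have hjn : pvSkipWs cs (i + 8) ≤ pvBlockEnd cs low (pvSkipWs cs (i + 8)) :=
          pv_blockEnd_ge _ _ _
        have hmem : 's' ∈ (low.take (pvBlockEnd cs low (pvSkipWs cs (i + 8)))).drop i := by
          rw [List.drop_take, pv_prefix_decomp h8, List.take_append,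
            List.take_of_length_le (show ("https://".toList).length ≤ _ from by
              rw [show ("https://".toList).length = 8 from rfl]; omega)]
          exact List.mem_append_left _ (by decide)
        rw [if_pos hmem, ite_self]
      · rw [if_neg h8]
        by_cases h7 : PySem.Chars.startswith (low.drop i) "http://".toList
        · rw [if_pos h7]
          have hj7 : i + 7 ≤ pvSkipWs cs (i + 7) := pv_skipWs_ge cs (i + 7)
          have hstep : PySem.Chars.strip ((cs.drop i).drop 7) = cs.drop (pvSkipWs cs (i + 7)) := by
            rw [List.drop_drop]
            exact pv_strip_eq_of_ntw hr (i + 7)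
          rw [hstep, ih (pvSkipWs cs (i + 7)) sc (by omega),
            show pvBlockEnd cs low i = pvBlockEnd cs low (pvSkipWs cs (i + 7)) from by
              rw [pvBlockEnd, if_neg h8, if_pos h7]]
          have hjn : pvSkipWs cs (i + 7) ≤ pvBlockEnd cs low (pvSkipWs cs (i + 7)) :=
            pv_blockEnd_ge _ _ _
          have hiff := pv_seg_iff cs low hlow i "http://".toList (by decide)
            h7
            (pvBlockEnd cs low (pvSkipWs cs (i + 7)))
            (by rw [show ("http://".toList).length = 7 from rfl]; omega)
          rw [show ("http://".toList).length = 7 from rfl] at hiff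
          rw [if_congr hiff.symm rfl rfl]
        · rw [if_neg h7]
          by_cases h2 : PySem.Chars.startswith (low.drop i) "//".toList
          · rw [if_pos h2]
            have hj2 : i + 2 ≤ pvSkipWs cs (i + 2) := pv_skipWs_ge cs (i + 2)
            have hstep : PySem.Chars.strip ((cs.drop i).drop 2) = cs.drop (pvSkipWs cs (i + 2)) := by
              rw [List.drop_drop]
              exact pv_strip_eq_of_ntw hr (i + 2)
            rw [hstep, ih (pvSkipWs cs (i + 2)) sc (by omega),
              show pvBlockEnd cs low i = pvBlockEnd cs low (pvSkipWs cs (i + 2)) from by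
                rw [pvBlockEnd, if_neg h8, if_neg h7, if_pos h2]]
            have hjn : pvSkipWs cs (i + 2) ≤ pvBlockEnd cs low (pvSkipWs cs (i + 2)) :=
              pv_blockEnd_ge _ _ _
            have hiff := pv_seg_iff cs low hlow i "//".toList (by decide)
              h2
              (pvBlockEnd cs low (pvSkipWs cs (i + 2)))
              (by rw [show ("//".toList).length = 2 from rfl]; omega)
            rw [show ("//".toList).length = 2 from rfl] at hiff
            rw [if_congr hiff.symm rfl rfl]
          · rw [if_neg h2]
            have hbe : pvBlockEnd cs low i = i := by
              rw [pvBlockEnd, if_neg h8, if_neg h7, if_neg h2]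
            have htake : (low.take i).drop i = [] := by
              apply List.drop_eq_nil_of_le
              exact List.length_take_le _ _
            rw [hbe, htake, if_neg (by simp)]

-- ===== VERDICT (by name: the statement is the Claim_ definition above) =====
theorem normalize_gcode_proxy_base_url_py_spec : Claim_equal_normalize_gcode_proxy_base_url_py := by
  intro raw _
  unfold Spec_normalize_gcode_proxy_base_url_py normalize_gcode_proxy_base_url_py
    normalize_gcode_proxy_base_url_py_alt
  simp only []
  by_cases hnil : PySem.Chars.strip raw.toList = []
  · rw [if_pos hnil, if_pos hnil]
  · rw [if_neg hnil, if_neg hnil]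
    have hr : pvNTW (PySem.Chars.strip raw.toList) := by
      rw [PySem.Chars.strip]; exact pv_ntw_rstrip _
    have hmain := pv_main (PySem.Chars.strip raw.toList) hr
      (PySem.Chars.lower (PySem.Chars.strip raw.toList)) rfl
      (PySem.Chars.strip raw.toList).length 0 "http" (by omega)
    rw [List.drop_zero, List.drop_zero] at hmain
    rw [hmain]
    rw [if_congr ((pv_isIn_s _).symm) rfl rfl]
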